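-- pv_equiv track=rewrite | github.com/algostudy0811/CodingTest | week13/4_PRO_150368_이모티콘_할인행사/PRO_150368_장현영.py | solution
-- ===== SOURCE A (Python) =====
-- from itertools import product
--
-- def solution(users, emoticons):
--     answer = []
--     sales = [10, 20, 30, 40]
--
--     for case in product(sales, repeat=len(emoticons)):  # 할인율 적용 모든 경우
--         result = [0, 0]  # [가입자 수, 구매 가격]
--         for user in users:
--             temp = 0  # user 지불 비용
--             for idx, sale in enumerate(case):
--                 if sale >= user[0]:  # 이모티콘 할인율이 유저가 원하는 할인율 이상이면 구매
--                     temp += emoticons[idx] * (100 - sale) // 100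
--
--             if temp >= user[1]:  # 유저가 생각하는 예산보다 초과하는 경우 이모티콘 플러스에 가입
--                 result[0] += 1  # result에 이모티콘 플러스 가입자 카운트 +1
--             else:
--                 result[1] += temp  # 이모티콘 플러스에 가입하지 않는다면 result에 이모티콘 구매 가격 누적
--
--         answer.append(result)
--
--     answer.sort(key=lambda x: (-x[0], -x[1]))  # 가입자 최대, 판매액 최대순
--
--     return answer[0]
-- ===== SOURCE B (Python) =====
-- def solution(users, emoticons):
--     # DFS over emoticon discount assignments maintaining per-discount bucket sums,
--     # so each leaf scores every user in O(1) via four suffix sums (no per-user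
--     # per-emoticon inner loop, no itertools.product, no sort).
--     def leaf_score(c10, c20, c30, c40):
--         subs = 0
--         rev = 0
--         for user in users:
--             u0 = user[0]
--             cost = c10 if u0 <= 10 else c20 if u0 <= 20 else c30 if u0 <= 30 else c40 if u0 <= 40 else 0
--             if cost >= user[1]:
--                 subs += 1
--             else:
--                 rev += cost
--         return (subs, rev)
--
--     def dfs(rest, b10, b20, b30, b40, best):
--         if not rest:
--             s = leaf_score(b40 + b30 + b20 + b10, b40 + b30 + b20, b40 + b30, b40)
--             if best is None or s[0] > best[0] or (s[0] == best[0] and s[1] > best[1]):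
--                 return s
--             return best
--         price, tail = rest[0], rest[1:]
--         best = dfs(tail, b10 + price * 90 // 100, b20, b30, b40, best)
--         best = dfs(tail, b10, b20 + price * 80 // 100, b30, b40, best)
--         best = dfs(tail, b10, b20, b30 + price * 70 // 100, b40, best)
--         best = dfs(tail, b10, b20, b30, b40 + price * 60 // 100, best)
--         return best
--
--     b = dfs(emoticons, 0, 0, 0, 0, None)
--     return [b[0], b[1]]
-- ===== Notes on version B (the rewrite author's own statement) =====
-- stated objective: alternative
-- what changed: B replaces A's product-enumeration with per-user per-emoticon rescoring plus build-all-then-sort by a DFS over discount assignments that carries four running bucket sums (total discounted price per discount rate), so each leaf scores every user in O(1) via suffix sums and a single running best pair replaces the sort.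
import Mathlib
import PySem

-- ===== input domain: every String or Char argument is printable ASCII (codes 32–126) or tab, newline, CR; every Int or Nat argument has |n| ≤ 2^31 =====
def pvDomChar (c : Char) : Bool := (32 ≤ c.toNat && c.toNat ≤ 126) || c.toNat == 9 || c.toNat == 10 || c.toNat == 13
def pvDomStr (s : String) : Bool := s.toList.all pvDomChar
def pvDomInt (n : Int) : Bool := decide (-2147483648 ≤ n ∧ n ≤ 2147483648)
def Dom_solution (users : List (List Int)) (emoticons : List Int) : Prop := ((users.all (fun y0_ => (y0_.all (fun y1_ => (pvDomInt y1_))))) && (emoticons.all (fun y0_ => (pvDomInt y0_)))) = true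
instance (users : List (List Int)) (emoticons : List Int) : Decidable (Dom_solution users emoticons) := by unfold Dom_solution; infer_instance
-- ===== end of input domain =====

-- B replaces A's enumerate-and-rescore-every-user-per-emoticon plus build-all-then-sort
-- by a DFS over discount assignments carrying four running bucket sums, scoring each
-- user in O(1) at the leaves and keeping one running best pair (objective: alternative).

-- ===== PORT A =====
-- itertools.product([10,20,30,40], repeat=n), in CPython's order (last coordinate
-- varies fastest).
def pvProdSales (n : Nat) : List (List Int) :=
  match n with
  | 0 => [[]]
  | n + 1 => ([10, 20, 30, 40] : List Int).flatMap (fun s => (pvProdSales n).map (fun c => s :: c))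

-- the tuple key lambda (-x[0], -x[1]) of A's sort, as its lexicographic ≤ test
def pvLeA (x y : List Int) : Bool :=
  decide (-(PySem.List.pyGetD x 0 0) < -(PySem.List.pyGetD y 0 0)
    ∨ (-(PySem.List.pyGetD x 0 0) = -(PySem.List.pyGetD y 0 0)
       ∧ -(PySem.List.pyGetD x 1 0) ≤ -(PySem.List.pyGetD y 1 0)))

-- the body of A's outer 'for case' loop: result = [0,0]; per-user inner loops.
-- user[0]/user[1] via pyGetD: exact under Pre_ (every user has ≥ 2 entries);
-- emoticons[idx] via pyGetD: exact, since idx < len(case) = len(emoticons).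
def pvScoreA (users : List (List Int)) (emoticons : List Int) (case_ : List Int) : List Int :=
  users.foldl (fun result user =>
    let temp : Int := (PySem.List.enumerate case_).foldl
      (fun temp p => if p.2 ≥ PySem.List.pyGetD user 0 0
        then temp + PySem.Int.floordiv (PySem.List.pyGetD emoticons p.1 0 * (100 - p.2)) 100
        else temp) 0
    if temp ≥ PySem.List.pyGetD user 1 0
    then [PySem.List.pyGetD result 0 0 + 1, PySem.List.pyGetD result 1 0]
    else [PySem.List.pyGetD result 0 0, PySem.List.pyGetD result 1 0 + temp]) [0, 0]

def solution (users : List (List Int)) (emoticons : List Int) : List Int :=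
  -- the append loop collects one result per case, in order: exactly this map
  -- (ported as map rather than repeated 'acc ++ [·]', whose quadratic re-copying
  -- cannot be evaluated on 4^m cases)
  let answer := (pvProdSales emoticons.length).map (pvScoreA users emoticons)
  -- answer.sort(key=λx: (-x[0], -x[1])): ported as Lean's STABLE mergeSort under the
  -- key's lexicographic ≤ — the same stable ascending reordering Python's sort
  -- produces; answer[0] via headD: answer ≠ [].
  (answer.mergeSort pvLeA).headD []

-- ===== PORT B =====
-- B's leaf_score: one O(1) lookup per user via the four suffix sums.
def pvLeafScore (users : List (List Int)) (c10 c20 c30 c40 : Int) : Int × Int :=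
  users.foldl (fun sr user =>
    let u0 := PySem.List.pyGetD user 0 0
    let cost : Int := if u0 ≤ 10 then c10 else if u0 ≤ 20 then c20
      else if u0 ≤ 30 then c30 else if u0 ≤ 40 then c40 else 0
    if cost ≥ PySem.List.pyGetD user 1 0 then (sr.1 + 1, sr.2) else (sr.1, sr.2 + cost)) (0, 0)

-- B's dfs: recursion on the remaining emoticons, bucket sums b10..b40 = discounted
-- price totals of the emoticons already assigned each rate, running best pair.
def pvDfs (users : List (List Int)) : List Int → Int → Int → Int → Int → Option (Int × Int) → Option (Int × Int)
  | [], b10, b20, b30, b40, best =>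
      let s := pvLeafScore users (b40 + b30 + b20 + b10) (b40 + b30 + b20) (b40 + b30) b40
      match best with
      | none => some s
      | some b => if s.1 > b.1 ∨ (s.1 = b.1 ∧ s.2 > b.2) then some s else some b
  | price :: tail, b10, b20, b30, b40, best =>
      let best := pvDfs users tail (b10 + PySem.Int.floordiv (price * 90) 100) b20 b30 b40 best
      let best := pvDfs users tail b10 (b20 + PySem.Int.floordiv (price * 80) 100) b30 b40 best
      let best := pvDfs users tail b10 b20 (b30 + PySem.Int.floordiv (price * 70) 100) b40 best
      pvDfs users tail b10 b20 b30 (b40 + PySem.Int.floordiv (price * 60) 100) best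

def solution_alt (users : List (List Int)) (emoticons : List Int) : List Int :=
  match pvDfs users emoticons 0 0 0 0 none with
  | some b => [b.1, b.2]
  | none => []  -- unreachable: dfs always returns a pair

-- ===== PRECONDITION & SPEC =====
-- Pre_ excludes exactly the inputs where Python A raises IndexError: a user entry
-- with fewer than two components (user[0] / user[1]).
def Pre_solution (users : List (List Int)) (emoticons : List Int) : Prop :=
  ∀ u ∈ users, 2 ≤ u.length
instance (users : List (List Int)) (emoticons : List Int) : Decidable (Pre_solution users emoticons) := by
  unfold Pre_solution; infer_instance

def pvWitness_solution : List (List Int) × List Int := ([[40, 100], [10, 5000]], [7000, 400])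

def Spec_solution (users : List (List Int)) (emoticons : List Int) (out : List Int) : Prop :=
  out = solution_alt users emoticons
instance (users : List (List Int)) (emoticons : List Int) (out : List Int) : Decidable (Spec_solution users emoticons out) := by
  unfold Spec_solution; infer_instance

-- ===== CLAIM (what is proved, stated in full; the proofs are below) =====
def Claim_equal_solution : Prop := ∀ (users : List (List Int)) (emoticons : List Int), Dom_solution users emoticons → Pre_solution users emoticons → Spec_solution users emoticons (solution users emoticons)

-- ===== LEMMAS AND PROOFS =====

-- strict lexicographic improvement step of B's running best
def pvStep (b p : Int × Int) : Int × Int :=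
  if p.1 > b.1 ∨ (p.1 = b.1 ∧ p.2 > b.2) then p else b

def pvOptStep (best : Option (Int × Int)) (s : Int × Int) : Option (Int × Int) :=
  match best with
  | none => some s
  | some b => if s.1 > b.1 ∨ (s.1 = b.1 ∧ s.2 > b.2) then some s else some b

-- bucket sums accumulated along one case (proof-side characterisation of the DFS path)
def pvAddB : List Int → List Int → Int × Int × Int × Int → Int × Int × Int × Int
  | price :: ps, s :: cs, (b10, b20, b30, b40) =>
      if s = 10 then pvAddB ps cs (b10 + PySem.Int.floordiv (price * 90) 100, b20, b30, b40)
      else if s = 20 then pvAddB ps cs (b10, b20 + PySem.Int.floordiv (price * 80) 100, b30, b40)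
      else if s = 30 then pvAddB ps cs (b10, b20, b30 + PySem.Int.floordiv (price * 70) 100, b40)
      else pvAddB ps cs (b10, b20, b30, b40 + PySem.Int.floordiv (price * 60) 100)
  | _, _, b => b

def pvScoreC (users : List (List Int)) (ps c : List Int) (b : Int × Int × Int × Int) : Int × Int :=
  match pvAddB ps c b with
  | (b10, b20, b30, b40) =>
      pvLeafScore users (b40 + b30 + b20 + b10) (b40 + b30 + b20) (b40 + b30) b40

-- the cost of a user with threshold u0 under bucket sums b
def pvCost (u0 : Int) : Int × Int × Int × Int → Int
  | (b10, b20, b30, b40) =>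
      if u0 ≤ 10 then b40 + b30 + b20 + b10 else if u0 ≤ 20 then b40 + b30 + b20
      else if u0 ≤ 30 then b40 + b30 else if u0 ≤ 40 then b40 else 0

-- every case produced by the product has length n
lemma pv_len_prod (n : Nat) : ∀ c ∈ pvProdSales n, c.length = n := by
  induction n with
  | zero => intro c hc; simp [pvProdSales] at hc; simp [hc]
  | succ n ih =>
    intro c hc
    simp only [pvProdSales, List.mem_flatMap, List.mem_map] at hc
    obtain ⟨s, _, t, ht, rfl⟩ := hc
    simp [ih t ht]

-- every entry of a case is one of the four rates
lemma pv_mem_prod (n : Nat) : ∀ c ∈ pvProdSales n, ∀ s ∈ c, s = 10 ∨ s = 20 ∨ s = 30 ∨ s = 40 := by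
  induction n with
  | zero => intro c hc; simp [pvProdSales] at hc; simp [hc]
  | succ n ih =>
    intro c hc
    simp only [pvProdSales, List.mem_flatMap, List.mem_map] at hc
    obtain ⟨s, hs, t, ht, rfl⟩ := hc
    intro x hx
    rcases List.mem_cons.mp hx with h | h
    · subst h; simpa using hs
    · exact ih t ht x h

lemma pv_prod_ne_nil (n : Nat) : pvProdSales n ≠ [] := by
  induction n with
  | zero => simp [pvProdSales]
  | succ n ih =>
    simp only [pvProdSales]
    intro h
    rcases List.flatMap_eq_nil_iff.mp h with hall
    have := hall 10 (by simp)
    simp [List.map_eq_nil_iff, ih] at this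

-- the two pyGetD reads on a literal two-element list
lemma pv_getD_pair (a b : Int) :
    PySem.List.pyGetD [a, b] 0 0 = a ∧ PySem.List.pyGetD [a, b] 1 0 = b := by
  constructor <;> rfl

-- A's inner enumerate+index loop equals the zip fold over (price, sale) pairs
lemma pv_inner (e : List Int) (w : Int) :
    ∀ (c : List Int) (s : Nat) (acc : Int), s + c.length = e.length →
    (PySem.List.enumerate c (s : Int)).foldl
      (fun t p => if p.2 ≥ w
        then t + PySem.Int.floordiv (PySem.List.pyGetD e p.1 0 * (100 - p.2)) 100 else t) acc
    = ((e.drop s).zip c).foldl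
      (fun t p => if p.2 ≥ w
        then t + PySem.Int.floordiv (p.1 * (100 - p.2)) 100 else t) acc := by
  intro c
  induction c with
  | nil => intro s acc _; simp [PySem.List.enumerate_nil]
  | cons x c ih =>
    intro s acc h
    have hs : s < e.length := by simp at h; omega
    have hdrop : e.drop s = e[s] :: e.drop (s + 1) := List.drop_eq_getElem_cons hs
    rw [PySem.List.enumerate_cons, hdrop]
    simp only [List.zip_cons_cons, List.foldl_cons]
    rw [PySem.List.pyGetD_natCast, List.getD_eq_getElem e 0 hs]
    have : (s : Int) + 1 = ((s + 1 : Nat) : Int) := by push_cast; ring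
    rw [this, ih (s + 1) _ (by simp at h ⊢; omega)]

-- the zip fold is additive in its accumulator
lemma pv_zfold_acc (w : Int) : ∀ (l : List (Int × Int)) (a : Int),
    l.foldl (fun t p => if p.2 ≥ w
      then t + PySem.Int.floordiv (p.1 * (100 - p.2)) 100 else t) a
    = a + l.foldl (fun t p => if p.2 ≥ w
      then t + PySem.Int.floordiv (p.1 * (100 - p.2)) 100 else t) 0 := by
  intro l
  induction l with
  | nil => intro a; simp
  | cons p l ih =>
    intro a
    simp only [List.foldl_cons]
    rw [ih, ih (if p.2 ≥ w then 0 + PySem.Int.floordiv (p.1 * (100 - p.2)) 100 else 0)]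
    by_cases h : p.2 ≥ w <;> simp [h] <;> ring

-- the bucket cost after accumulating a case equals the previous cost plus the
-- zip fold A computes for that user
lemma pv_cost_add (w : Int) : ∀ (ps c : List Int) (b10 b20 b30 b40 : Int),
    c.length = ps.length → (∀ s ∈ c, s = 10 ∨ s = 20 ∨ s = 30 ∨ s = 40) →
    pvCost w (pvAddB ps c (b10, b20, b30, b40))
    = pvCost w (b10, b20, b30, b40) + (ps.zip c).foldl
        (fun t p => if p.2 ≥ w
          then t + PySem.Int.floordiv (p.1 * (100 - p.2)) 100 else t) 0 := by
  intro ps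
  induction ps with
  | nil =>
    intro c b10 b20 b30 b40 hlen _
    have : c = [] := List.eq_nil_of_length_eq_zero (by simpa using hlen)
    subst this; simp [pvAddB]
  | cons price ps ih =>
    intro c b10 b20 b30 b40 hlen hmem
    cases c with
    | nil => simp at hlen
    | cons s cs =>
      have hlen' : cs.length = ps.length := by simpa using hlen
      have hmem' : ∀ x ∈ cs, x = 10 ∨ x = 20 ∨ x = 30 ∨ x = 40 :=
        fun x hx => hmem x (List.mem_cons_of_mem _ hx)
      have hzip : ((price :: ps).zip (s :: cs)).foldl
          (fun t p => if p.2 ≥ w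
            then t + PySem.Int.floordiv (p.1 * (100 - p.2)) 100 else t) 0
          = (if s ≥ w then 0 + PySem.Int.floordiv (price * (100 - s)) 100 else 0)
            + (ps.zip cs).foldl (fun t p => if p.2 ≥ w
                then t + PySem.Int.floordiv (p.1 * (100 - p.2)) 100 else t) 0 := by
        simp only [List.zip_cons_cons, List.foldl_cons]
        exact pv_zfold_acc w _ _
      rcases hmem s (by simp) with rfl | rfl | rfl | rfl
      · rw [show (100 : Int) - 10 = 90 from by norm_num] at hzip
        have hstep : pvAddB (price :: ps) (10 :: cs) (b10, b20, b30, b40)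
            = pvAddB ps cs (b10 + PySem.Int.floordiv (price * 90) 100, b20, b30, b40) := by
          simp [pvAddB]
        rw [hstep, ih cs _ _ _ _ hlen' hmem', hzip]
        generalize PySem.Int.floordiv (price * 90) 100 = d
        simp only [pvCost]
        split_ifs <;> omega
      · rw [show (100 : Int) - 20 = 80 from by norm_num] at hzip
        have hstep : pvAddB (price :: ps) (20 :: cs) (b10, b20, b30, b40)
            = pvAddB ps cs (b10, b20 + PySem.Int.floordiv (price * 80) 100, b30, b40) := by
          simp [pvAddB]
        rw [hstep, ih cs _ _ _ _ hlen' hmem', hzip]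
        generalize PySem.Int.floordiv (price * 80) 100 = d
        simp only [pvCost]
        split_ifs <;> omega
      · rw [show (100 : Int) - 30 = 70 from by norm_num] at hzip
        have hstep : pvAddB (price :: ps) (30 :: cs) (b10, b20, b30, b40)
            = pvAddB ps cs (b10, b20, b30 + PySem.Int.floordiv (price * 70) 100, b40) := by
          simp [pvAddB]
        rw [hstep, ih cs _ _ _ _ hlen' hmem', hzip]
        generalize PySem.Int.floordiv (price * 70) 100 = d
        simp only [pvCost]
        split_ifs <;> omega
      · rw [show (100 : Int) - 40 = 60 from by norm_num] at hzip
        have hstep : pvAddB (price :: ps) (40 :: cs) (b10, b20, b30, b40)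
            = pvAddB ps cs (b10, b20, b30, b40 + PySem.Int.floordiv (price * 60) 100) := by
          simp [pvAddB]
        rw [hstep, ih cs _ _ _ _ hlen' hmem', hzip]
        generalize PySem.Int.floordiv (price * 60) 100 = d
        simp only [pvCost]
        split_ifs <;> omega

lemma pv_cost_zero (w : Int) : pvCost w (0, 0, 0, 0) = 0 := by
  simp only [pvCost]; split_ifs <;> ring

-- A's per-case result list is B's per-case bucket-sum score
lemma pv_scoreAC (users : List (List Int)) (e c : List Int)
    (hlen : c.length = e.length) (hmem : ∀ s ∈ c, s = 10 ∨ s = 20 ∨ s = 30 ∨ s = 40) :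
    pvScoreA users e c
    = [(pvScoreC users e c (0, 0, 0, 0)).1, (pvScoreC users e c (0, 0, 0, 0)).2] := by
  rcases hB : pvAddB e c (0, 0, 0, 0) with ⟨b10, b20, b30, b40⟩
  have hCeq : pvScoreC users e c (0, 0, 0, 0)
      = pvLeafScore users (b40 + b30 + b20 + b10) (b40 + b30 + b20) (b40 + b30) b40 := by
    simp [pvScoreC, hB]
  rw [hCeq]
  clear hCeq
  unfold pvScoreA pvLeafScore
  suffices H : ∀ (a b : Int),
      users.foldl (fun result user =>
        let temp : Int := (PySem.List.enumerate c).foldl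
          (fun temp p => if p.2 ≥ PySem.List.pyGetD user 0 0
            then temp + PySem.Int.floordiv (PySem.List.pyGetD e p.1 0 * (100 - p.2)) 100
            else temp) 0
        if temp ≥ PySem.List.pyGetD user 1 0
        then [PySem.List.pyGetD result 0 0 + 1, PySem.List.pyGetD result 1 0]
        else [PySem.List.pyGetD result 0 0, PySem.List.pyGetD result 1 0 + temp]) [a, b]
      = [(users.foldl (fun sr user =>
          let u0 := PySem.List.pyGetD user 0 0
          let cost : Int := if u0 ≤ 10 then b40 + b30 + b20 + b10 else if u0 ≤ 20 then b40 + b30 + b20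
            else if u0 ≤ 30 then b40 + b30 else if u0 ≤ 40 then b40 else 0
          if cost ≥ PySem.List.pyGetD user 1 0 then (sr.1 + 1, sr.2) else (sr.1, sr.2 + cost)) (a, b)).1,
         (users.foldl (fun sr user =>
          let u0 := PySem.List.pyGetD user 0 0
          let cost : Int := if u0 ≤ 10 then b40 + b30 + b20 + b10 else if u0 ≤ 20 then b40 + b30 + b20
            else if u0 ≤ 30 then b40 + b30 else if u0 ≤ 40 then b40 else 0
          if cost ≥ PySem.List.pyGetD user 1 0 then (sr.1 + 1, sr.2) else (sr.1, sr.2 + cost)) (a, b)).2] by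
    exact H 0 0
  induction users with
  | nil => intro a b; simp
  | cons u us ihu =>
    intro a b
    simp only [List.foldl_cons]
    -- per-user cost equality
    have htemp : (PySem.List.enumerate c).foldl
        (fun temp p => if p.2 ≥ PySem.List.pyGetD u 0 0
          then temp + PySem.Int.floordiv (PySem.List.pyGetD e p.1 0 * (100 - p.2)) 100
          else temp) 0
        = (if PySem.List.pyGetD u 0 0 ≤ 10 then b40 + b30 + b20 + b10
           else if PySem.List.pyGetD u 0 0 ≤ 20 then b40 + b30 + b20
           else if PySem.List.pyGetD u 0 0 ≤ 30 then b40 + b30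
           else if PySem.List.pyGetD u 0 0 ≤ 40 then b40 else 0) := by
      have h1 := pv_inner e (PySem.List.pyGetD u 0 0) c 0 0 (by simpa using hlen)
      simp only [Nat.cast_zero, List.drop_zero] at h1
      have h2 := pv_cost_add (PySem.List.pyGetD u 0 0) e c 0 0 0 0 hlen hmem
      rw [hB, pv_cost_zero, zero_add] at h2
      rw [h1, ← h2]
      rfl
    rw [htemp, (pv_getD_pair a b).1, (pv_getD_pair a b).2]
    set cost := (if PySem.List.pyGetD u 0 0 ≤ 10 then b40 + b30 + b20 + b10
      else if PySem.List.pyGetD u 0 0 ≤ 20 then b40 + b30 + b20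
      else if PySem.List.pyGetD u 0 0 ≤ 30 then b40 + b30
      else if PySem.List.pyGetD u 0 0 ≤ 40 then b40 else 0) with hcost
    by_cases hge : cost ≥ PySem.List.pyGetD u 1 0
    · rw [if_pos hge, if_pos hge]; exact ihu (a + 1) b
    · rw [if_neg hge, if_neg hge]; exact ihu a (b + cost)

-- the DFS is the fold of the strict-improvement step over the product, case by case
lemma pv_dfs_fold (users : List (List Int)) : ∀ (tail : List Int) (b10 b20 b30 b40 : Int) (best : Option (Int × Int)),
    pvDfs users tail b10 b20 b30 b40 best
    = (pvProdSales tail.length).foldl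
        (fun bst c => pvOptStep bst (pvScoreC users tail c (b10, b20, b30, b40))) best := by
  intro tail
  induction tail with
  | nil =>
    intro b10 b20 b30 b40 best
    simp [pvDfs, pvProdSales, pvScoreC, pvAddB, pvOptStep]
  | cons price tail ih =>
    intro b10 b20 b30 b40 best
    have hsc : ∀ (s : Int) (c : List Int) (h10 h20 h30 h40 : Int),
        s = 10 ∨ s = 20 ∨ s = 30 ∨ s = 40 →
        pvScoreC users (price :: tail) (s :: c) (h10, h20, h30, h40)
        = pvScoreC users tail c
            (if s = 10 then (h10 + PySem.Int.floordiv (price * 90) 100, h20, h30, h40)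
             else if s = 20 then (h10, h20 + PySem.Int.floordiv (price * 80) 100, h30, h40)
             else if s = 30 then (h10, h20, h30 + PySem.Int.floordiv (price * 70) 100, h40)
             else (h10, h20, h30, h40 + PySem.Int.floordiv (price * 60) 100)) := by
      intro s c h10 h20 h30 h40 hs
      rcases hs with rfl | rfl | rfl | rfl <;> norm_num [pvScoreC, pvAddB]
    show pvDfs users (price :: tail) b10 b20 b30 b40 best = _
    simp only [List.length_cons, pvProdSales, List.flatMap_cons, List.flatMap_nil,
      List.append_nil, List.foldl_append, List.foldl_map]
    rw [show pvDfs users (price :: tail) b10 b20 b30 b40 best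
      = pvDfs users tail b10 b20 b30 (b40 + PySem.Int.floordiv (price * 60) 100)
          (pvDfs users tail b10 b20 (b30 + PySem.Int.floordiv (price * 70) 100) b40
            (pvDfs users tail b10 (b20 + PySem.Int.floordiv (price * 80) 100) b30 b40
              (pvDfs users tail (b10 + PySem.Int.floordiv (price * 90) 100) b20 b30 b40 best))) from rfl]
    rw [ih, ih, ih, ih]
    have hf10 : (fun (bst : Option (Int × Int)) (c : List Int) =>
          pvOptStep bst (pvScoreC users (price :: tail) (10 :: c) (b10, b20, b30, b40)))
        = fun bst c => pvOptStep bst (pvScoreC users tail c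
            (b10 + PySem.Int.floordiv (price * 90) 100, b20, b30, b40)) := by
      funext bst c; rw [hsc 10 c _ _ _ _ (by norm_num)]; norm_num
    have hf20 : (fun (bst : Option (Int × Int)) (c : List Int) =>
          pvOptStep bst (pvScoreC users (price :: tail) (20 :: c) (b10, b20, b30, b40)))
        = fun bst c => pvOptStep bst (pvScoreC users tail c
            (b10, b20 + PySem.Int.floordiv (price * 80) 100, b30, b40)) := by
      funext bst c; rw [hsc 20 c _ _ _ _ (by norm_num)]; norm_num
    have hf30 : (fun (bst : Option (Int × Int)) (c : List Int) =>
          pvOptStep bst (pvScoreC users (price :: tail) (30 :: c) (b10, b20, b30, b40)))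
        = fun bst c => pvOptStep bst (pvScoreC users tail c
            (b10, b20, b30 + PySem.Int.floordiv (price * 70) 100, b40)) := by
      funext bst c; rw [hsc 30 c _ _ _ _ (by norm_num)]; norm_num
    have hf40 : (fun (bst : Option (Int × Int)) (c : List Int) =>
          pvOptStep bst (pvScoreC users (price :: tail) (40 :: c) (b10, b20, b30, b40)))
        = fun bst c => pvOptStep bst (pvScoreC users tail c
            (b10, b20, b30, b40 + PySem.Int.floordiv (price * 60) 100)) := by
      funext bst c; rw [hsc 40 c _ _ _ _ (by norm_num)]; norm_num
    rw [hf10, hf20, hf30, hf40]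

-- pvStep keeps the leftmost maximum; it is associative in this mixed sense
lemma pv_step_assoc (a y w : Int × Int) : pvStep (pvStep a y) w = pvStep a (pvStep y w) := by
  obtain ⟨a1, a2⟩ := a; obtain ⟨y1, y2⟩ := y; obtain ⟨w1, w2⟩ := w
  unfold pvStep
  split_ifs <;> simp_all [Prod.mk.injEq] <;> omega

-- folding pvStep from a seeded accumulator
lemma pv_fold_if (ys : List (Int × Int)) : ∀ (a y : Int × Int),
    ys.foldl pvStep (pvStep a y) = pvStep a (ys.foldl pvStep y) := by
  induction ys with
  | nil => intro a y; rfl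
  | cons z zs ih =>
    intro a y
    simp only [List.foldl_cons]
    rw [ih (pvStep a y) z, ih y z, pv_step_assoc]

-- the comparison pvLeA on two literal result pairs, against the strict-improvement test
lemma pv_le_pair (p m : Int × Int) :
    pvLeA [p.1, p.2] [m.1, m.2] = true ↔ ¬ (m.1 > p.1 ∨ (m.1 = p.1 ∧ m.2 > p.2)) := by
  unfold pvLeA
  rw [(pv_getD_pair p.1 p.2).1, (pv_getD_pair p.1 p.2).2,
    (pv_getD_pair m.1 m.2).1, (pv_getD_pair m.1 m.2).2]
  simp only [decide_eq_true_eq]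
  omega

lemma pv_le_trans : ∀ (a b c : List Int), pvLeA a b = true → pvLeA b c = true → pvLeA a c = true := by
  intro a b c
  unfold pvLeA
  simp only [decide_eq_true_eq]
  omega

lemma pv_le_total : ∀ (a b : List Int), (pvLeA a b || pvLeA b a) = true := by
  intro a b
  unfold pvLeA
  simp only [Bool.or_eq_true, decide_eq_true_eq]
  omega

-- head of A's stable sort = the running strict-improvement maximum
lemma pv_merge_head : ∀ (t : List (Int × Int)) (p : Int × Int),
    (((p :: t).map (fun q : Int × Int => [q.1, q.2])).mergeSort pvLeA).headD []
    = [(t.foldl pvStep p).1, (t.foldl pvStep p).2] := by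
  intro t
  induction t with
  | nil => intro p; simp [List.mergeSort_singleton]
  | cons y ys ih =>
    intro p
    obtain ⟨l₁, l₂, h1, h2, h3⟩ :=
      List.mergeSort_cons pv_le_trans pv_le_total ([p.1, p.2]) ((y :: ys).map (fun q : Int × Int => [q.1, q.2]))
    have hmap : (p :: y :: ys).map (fun q : Int × Int => [q.1, q.2])
        = [p.1, p.2] :: (y :: ys).map (fun q : Int × Int => [q.1, q.2]) := rfl
    rw [hmap, h1]
    have hIH := ih y
    rw [h2] at hIH
    have hfold : (y :: ys).foldl pvStep p = pvStep p (ys.foldl pvStep y) := by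
      simp only [List.foldl_cons]
      exact pv_fold_if ys p y
    rw [hfold]
    set m := ys.foldl pvStep y with hm
    cases l₁ with
    | cons h r₁ =>
      have hh : h = [m.1, m.2] := by simpa using hIH
      have hle : pvLeA [p.1, p.2] h = false := by
        have := h3 h (by simp)
        simpa using this
      rw [hh] at hle
      have hgt : m.1 > p.1 ∨ (m.1 = p.1 ∧ m.2 > p.2) := by
        by_contra hc
        rw [(pv_le_pair p m).mpr hc] at hle
        simp at hle
      have : pvStep p m = m := by unfold pvStep; rw [if_pos hgt]
      rw [this, hh]
      rfl
    | nil =>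
      simp only [List.nil_append] at h1 h2
      have hne : l₂ ≠ [] := by
        intro hnil
        rw [hnil] at h2
        have := congrArg List.length h2
        simp [List.length_mergeSort] at this
      obtain ⟨z, zs, rfl⟩ := List.exists_cons_of_ne_nil hne
      have hz : z = [m.1, m.2] := by simpa using hIH
      have hsorted := List.pairwise_mergeSort pv_le_trans pv_le_total
        ([p.1, p.2] :: (y :: ys).map (fun q : Int × Int => [q.1, q.2]))
      rw [h1] at hsorted
      have hle : pvLeA [p.1, p.2] z = true := (List.pairwise_cons.mp hsorted).1 z (by simp)
      rw [hz] at hle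
      have hngt : ¬ (m.1 > p.1 ∨ (m.1 = p.1 ∧ m.2 > p.2)) := (pv_le_pair p m).mp hle
      have hstep : pvStep p m = p := by unfold pvStep; rw [if_neg hngt]
      rw [hstep]
      rfl

-- B's Option fold started at some p is the pvStep fold
lemma pv_opt_fold (g : List Int → Int × Int) :
    ∀ (l : List (List Int)) (p : Int × Int),
    l.foldl (fun bst c => pvOptStep bst (g c)) (some p)
    = some ((l.map g).foldl pvStep p) := by
  intro l
  induction l with
  | nil => intro p; rfl
  | cons cse l ih =>
    intro p
    have hinit : pvOptStep (some p) (g cse) = some (pvStep p (g cse)) := by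
      unfold pvOptStep pvStep
      exact (apply_ite some _ _ _).symm
    rw [List.foldl_cons, hinit, ih, List.map_cons, List.foldl_cons]

-- ===== VERDICT (by name: the statement is the Claim_ definition above) =====
theorem solution_spec : Claim_equal_solution := by
  intro users emoticons _hdom _hpre
  unfold Spec_solution solution solution_alt
  set g : List Int → Int × Int := fun c => pvScoreC users emoticons c (0, 0, 0, 0) with hg
  have hmap : (pvProdSales emoticons.length).map (pvScoreA users emoticons)
      = (pvProdSales emoticons.length).map (fun c => [(g c).1, (g c).2]) := by
    apply List.map_congr_left
    intro c hc
    exact pv_scoreAC users emoticons c (pv_len_prod _ c hc) (pv_mem_prod _ c hc)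
  rw [hmap]
  rw [pv_dfs_fold]
  obtain ⟨c0, rest, hcr⟩ := List.exists_cons_of_ne_nil (pv_prod_ne_nil emoticons.length)
  rw [hcr]
  have hcomp : ((c0 :: rest).map (fun c => [(g c).1, (g c).2]))
      = ((g c0 :: rest.map g).map (fun q : Int × Int => [q.1, q.2])) := by
    simp
  rw [hcomp, pv_merge_head]
  rw [List.foldl_cons]
  have h0 : pvOptStep none (g c0) = some (g c0) := rfl
  rw [h0, pv_opt_fold]
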